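-- pv_equiv track=rewrite | github.com/naturalmemo/personal_color | personal_color/pcf_model/ImageProcessing.py | dark_eyed_color
-- ===== SOURCE A (Python) =====
-- def dark_eyed_color(H_list,S_list,V_list):   # Vが30以下の割合によって処理を変える
--     H_list_O30=[]
--     S_list_O30=[]
--     V_list_O30=[]
--     i=0
--     for point in V_list:
--         if point > 30:
--             H_list_O30.append(H_list[i])
--             S_list_O30.append(S_list[i])
--             V_list_O30.append(V_list[i])
--         i+=1
--     len_persent = len(H_list_O30)/len(H_list)
--     if len_persent >= 0.40:                                 # 虹彩と瞳孔がはっきり分かれているとき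
--         return H_list_O30,S_list_O30,V_list_O30             # Vが30より大きい座標のHSVをそれぞれ返す
--     else:                                                   # 虹彩と瞳孔がはっきり分かれていないとき
--         H_list_O30U100=[]
--         S_list_O30U100=[]
--         V_list_O30U100=[]
--         i=0
--         for point in V_list_O30:
--             if point < 100:
--                 H_list_O30U100.append(H_list_O30[i])
--                 S_list_O30U100.append(S_list_O30[i])
--                 V_list_O30U100.append(V_list_O30[i])
--             i+=1
--         return H_list_O30U100,S_list_O30U100,V_list_O30U100 # Vが30より大きく、100未満の座標のHSVをそれぞれ返す
-- ===== SOURCE B (Python) =====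
-- def dark_eyed_color(H_list, S_list, V_list):
--     # One pass over indices: collect both candidate triple lists at once,
--     # then pick one by the V>30 ratio and unzip it.
--     keepA = []  # triples with V > 30
--     keepB = []  # triples with 30 < V < 100
--     for i in range(len(V_list)):
--         v = V_list[i]
--         if v > 30:
--             t = (H_list[i], S_list[i], v)
--             keepA.append(t)
--             if v < 100:
--                 keepB.append(t)
--     chosen = keepA if len(keepA) / len(H_list) >= 0.40 else keepB
--     return [t[0] for t in chosen], [t[1] for t in chosen], [t[2] for t in chosen]
-- ===== Notes on version B (the rewrite author's own statement) =====
-- stated objective: alternative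
-- what changed: Instead of A's two sequential filter passes (build the V>30 lists, then re-filter them by V<100 with a second indexed loop), B makes one pass over the indices building both candidate triple lists (V>30 and 30<V<100) simultaneously, then unzips whichever the >=0.40 ratio test selects.
import Mathlib
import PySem

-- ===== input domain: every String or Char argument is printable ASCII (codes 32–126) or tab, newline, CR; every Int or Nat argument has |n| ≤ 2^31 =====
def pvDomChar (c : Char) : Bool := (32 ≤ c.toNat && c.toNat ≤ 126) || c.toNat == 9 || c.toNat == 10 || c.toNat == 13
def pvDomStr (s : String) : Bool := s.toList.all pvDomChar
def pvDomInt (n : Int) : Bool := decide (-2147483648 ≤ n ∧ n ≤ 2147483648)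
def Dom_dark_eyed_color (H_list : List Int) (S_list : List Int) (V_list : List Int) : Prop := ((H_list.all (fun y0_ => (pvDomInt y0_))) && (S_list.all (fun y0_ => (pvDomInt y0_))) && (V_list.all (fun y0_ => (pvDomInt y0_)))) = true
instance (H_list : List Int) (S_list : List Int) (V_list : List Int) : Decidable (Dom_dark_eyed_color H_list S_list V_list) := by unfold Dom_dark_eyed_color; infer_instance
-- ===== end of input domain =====

-- B builds both candidate triple lists in ONE pass and unzips the chosen one (alternative
-- decomposition, same cost class). Equivalence is about return values; neither mutates its arguments.
-- Python's float test `len(H_O30)/len(H) >= 0.40` is ported as the exact rational comparison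
-- `5*len(H_O30) >= 2*len(H)`: for counts below 2^31 the quotient is never close enough to 0.4
-- for double rounding to cross the threshold (gap ≥ 1/(5·len) ≫ one ulp of 0.4).

-- ===== PORT A =====
def dark_eyed_color (H_list : List Int) (S_list : List Int) (V_list : List Int) : List Int × List Int × List Int :=
  -- first loop: i, H_list_O30, S_list_O30, V_list_O30
  let st := V_list.foldl
    (fun (st : Int × List Int × List Int × List Int) point =>
      if point > 30 then
        (st.1 + 1, st.2.1 ++ [PySem.List.pyGetD H_list st.1 0],
         st.2.2.1 ++ [PySem.List.pyGetD S_list st.1 0],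
         st.2.2.2 ++ [PySem.List.pyGetD V_list st.1 0])
      else (st.1 + 1, st.2)) ((0 : Int), ([], [], []))
  let hO := st.2.1
  let sO := st.2.2.1
  let vO := st.2.2.2
  if 5 * (hO.length : Int) ≥ 2 * (H_list.length : Int) then (hO, sO, vO)
  else
    let st2 := vO.foldl
      (fun (st : Int × List Int × List Int × List Int) point =>
        if point < 100 then
          (st.1 + 1, st.2.1 ++ [PySem.List.pyGetD hO st.1 0],
           st.2.2.1 ++ [PySem.List.pyGetD sO st.1 0],
           st.2.2.2 ++ [PySem.List.pyGetD vO st.1 0])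
        else (st.1 + 1, st.2)) ((0 : Int), ([], [], []))
    (st2.2.1, st2.2.2.1, st2.2.2.2)

-- ===== PORT B =====
def dark_eyed_color_alt (H_list : List Int) (S_list : List Int) (V_list : List Int) : List Int × List Int × List Int :=
  let keep := (PySem.List.pyRange 0 (V_list.length : Int) 1).foldl
    (fun (st : List (Int × Int × Int) × List (Int × Int × Int)) i =>
      let v := PySem.List.pyGetD V_list i 0
      if v > 30 then
        let t := (PySem.List.pyGetD H_list i 0, PySem.List.pyGetD S_list i 0, v)
        (st.1 ++ [t], if v < 100 then st.2 ++ [t] else st.2)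
      else st) ([], [])
  let chosen := if 5 * (keep.1.length : Int) ≥ 2 * (H_list.length : Int) then keep.1 else keep.2
  (chosen.map (·.1), chosen.map (·.2.1), chosen.map (·.2.2))

-- ===== PRECONDITION & SPEC =====
-- Pre_ excludes exactly the inputs where Python A raises: empty H_list (ZeroDivisionError in the
-- ratio) and inputs where some kept index (V[i] > 30) is out of range of H_list or S_list (IndexError).
def Pre_dark_eyed_color (H_list : List Int) (S_list : List Int) (V_list : List Int) : Prop :=
  H_list ≠ [] ∧ ∀ i : Nat, i < V_list.length → 30 < V_list.getD i 0 →
    i < H_list.length ∧ i < S_list.length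
instance (H_list : List Int) (S_list : List Int) (V_list : List Int) : Decidable (Pre_dark_eyed_color H_list S_list V_list) := by unfold Pre_dark_eyed_color; infer_instance
def pvWitness_dark_eyed_color : List Int × List Int × List Int := ([50, 20], [60, 10], [50, 20])
def Spec_dark_eyed_color (H_list : List Int) (S_list : List Int) (V_list : List Int) (out : List Int × List Int × List Int) : Prop := out = dark_eyed_color_alt H_list S_list V_list
instance (H_list : List Int) (S_list : List Int) (V_list : List Int) (out : List Int × List Int × List Int) : Decidable (Spec_dark_eyed_color H_list S_list V_list out) := by unfold Spec_dark_eyed_color; infer_instance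

-- ===== CLAIM (what is proved, stated in full; the proofs are below) =====
def Claim_equal_dark_eyed_color : Prop := ∀ (H_list : List Int) (S_list : List Int) (V_list : List Int), Dom_dark_eyed_color H_list S_list V_list → Pre_dark_eyed_color H_list S_list V_list → Spec_dark_eyed_color H_list S_list V_list (dark_eyed_color H_list S_list V_list)

-- ===== LEMMAS AND PROOFS =====

-- the kept triples for indices k, k+1, …, k+n-1
def pvTrips (H S V : List Int) (k n : Nat) : List (Int × Int × Int) :=
  (List.range' k n).filterMap (fun (i : Nat) =>
    if 30 < PySem.List.pyGetD V (i : Int) 0 then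
      some (PySem.List.pyGetD H (i : Int) 0, PySem.List.pyGetD S (i : Int) 0,
            PySem.List.pyGetD V (i : Int) 0)
    else none)

theorem pvTrips_succ (H S V : List Int) (k m : Nat) :
    pvTrips H S V k (m + 1) =
      (if 30 < PySem.List.pyGetD V (k : Int) 0 then
        [(PySem.List.pyGetD H (k : Int) 0, PySem.List.pyGetD S (k : Int) 0,
          PySem.List.pyGetD V (k : Int) 0)] else []) ++ pvTrips H S V (k + 1) m := by
  unfold pvTrips
  rw [List.range'_succ, List.filterMap_cons]
  by_cases hc : 30 < PySem.List.pyGetD V (k : Int) 0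
  · have hc' := hc; simp at hc'
    rw [if_pos hc]; simp [hc']
  · have hc' := hc; simp at hc'
    rw [if_neg hc]; simp [hc']

theorem pvFoldA_gen (H S V : List Int) :
    ∀ (W : List Int) (k : Nat) (h s v : List Int), W = V.drop k →
    ((W.foldl
      (fun (st : Int × List Int × List Int × List Int) point =>
        if point > 30 then
          (st.1 + 1, st.2.1 ++ [PySem.List.pyGetD H st.1 0],
           st.2.2.1 ++ [PySem.List.pyGetD S st.1 0],
           st.2.2.2 ++ [PySem.List.pyGetD V st.1 0])
        else (st.1 + 1, st.2)) ((k : Int), h, s, v)).2 :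
        List Int × List Int × List Int) =
      (h ++ (pvTrips H S V k (V.length - k)).map (·.1),
       s ++ (pvTrips H S V k (V.length - k)).map (·.2.1),
       v ++ (pvTrips H S V k (V.length - k)).map (·.2.2)) := by
  intro W
  induction W with
  | nil =>
    intro k h s v hW
    have hk : V.length ≤ k := by
      have := congrArg List.length hW; simp at this; omega
    simp [pvTrips, Nat.sub_eq_zero_of_le hk]
  | cons p W' ih =>
    intro k h s v hW
    have h0 : V[k]? = some p := by
      have h1 : (V.drop k)[0]? = some p := by rw [← hW]; simp
      simpa using h1
    have hk : k < V.length := by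
      by_contra hc
      rw [List.getElem?_eq_none_iff.mpr (by omega)] at h0; cases h0
    have hW' : W' = V.drop (k + 1) := by
      have h2 : (V.drop k).drop 1 = W' := by rw [← hW]; simp
      rw [← h2, List.drop_drop]
    have hgd : PySem.List.pyGetD V (k : Int) 0 = p := by
      simp [PySem.List.pyGetD_natCast, List.getD, h0]
    have hsub : V.length - k = (V.length - (k + 1)) + 1 := by omega
    rw [hsub, pvTrips_succ, hgd]
    have hcast : ((k : Int) + 1) = ((k + 1 : Nat) : Int) := by push_cast; ring
    simp only [List.foldl_cons]
    by_cases hp : p > 30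
    · rw [if_pos hp, if_pos (by exact_mod_cast hp)]
      rw [hcast]
      rw [ih (k + 1) _ _ _ hW']
      simp [h0]
    · rw [if_neg hp, if_neg (by exact_mod_cast hp)]
      rw [hcast]
      rw [ih (k + 1) _ _ _ hW']
      simp

theorem pvFoldA2_gen (T : List (Int × Int × Int)) :
    ∀ (T2 T1 : List (Int × Int × Int)) (h s v : List Int), T = T1 ++ T2 →
    (((T2.map (·.2.2)).foldl
      (fun (st : Int × List Int × List Int × List Int) point =>
        if point < 100 then
          (st.1 + 1, st.2.1 ++ [PySem.List.pyGetD (T.map (·.1)) st.1 0],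
           st.2.2.1 ++ [PySem.List.pyGetD (T.map (·.2.1)) st.1 0],
           st.2.2.2 ++ [PySem.List.pyGetD (T.map (·.2.2)) st.1 0])
        else (st.1 + 1, st.2)) ((T1.length : Int), h, s, v)).2 :
        List Int × List Int × List Int) =
      (h ++ (T2.filter (fun t => t.2.2 < 100)).map (·.1),
       s ++ (T2.filter (fun t => t.2.2 < 100)).map (·.2.1),
       v ++ (T2.filter (fun t => t.2.2 < 100)).map (·.2.2)) := by
  intro T2
  induction T2 with
  | nil => intro T1 h s v hT; simp
  | cons t T2' ih =>
    intro T1 h s v hT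
    have e1 : ∀ (f : Int × Int × Int → Int),
        PySem.List.pyGetD (T.map f) (T1.length : Int) 0 = f t := by
      intro f
      rw [hT]
      simp [List.getD, List.map_append]
    have hT2 : T = (T1 ++ [t]) ++ T2' := by rw [hT]; simp
    have hcast : ((T1.length : Int) + 1) = (((T1 ++ [t]).length : Nat) : Int) := by
      simp
    simp only [List.map_cons, List.foldl_cons]
    by_cases hp : t.2.2 < 100
    · rw [if_pos hp, e1, e1, e1, hcast, ih (T1 ++ [t]) _ _ _ hT2]
      simp [hp]
    · rw [if_neg hp, hcast, ih (T1 ++ [t]) _ _ _ hT2]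
      simp [hp]

theorem pvFoldB (H S V : List Int) (n : Nat) :
    ((PySem.List.pyRange 0 (n : Int) 1).foldl
      (fun (st : List (Int × Int × Int) × List (Int × Int × Int)) i =>
        let v := PySem.List.pyGetD V i 0
        if v > 30 then
          let t := (PySem.List.pyGetD H i 0, PySem.List.pyGetD S i 0, v)
          (st.1 ++ [t], if v < 100 then st.2 ++ [t] else st.2)
        else st) ([], [])) =
      (pvTrips H S V 0 n, (pvTrips H S V 0 n).filter (fun t => t.2.2 < 100)) := by
  induction n with
  | zero =>
    rw [PySem.List.pyRange_one_eq_nil (by omega)]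
    simp [pvTrips]
  | succ n ih =>
    have hcast : ((n + 1 : Nat) : Int) = (n : Int) + 1 := by push_cast; ring
    have hrng : PySem.List.pyRange 0 ((n : Int) + 1) 1 =
        PySem.List.pyRange 0 (n : Int) 1 ++ [(n : Int)] := by
      simpa using PySem.List.pyRange_one_succ_right (a := 0) (b := (n : Int)) (by positivity)
    have htr : pvTrips H S V 0 (n + 1) = pvTrips H S V 0 n ++
        (if 30 < PySem.List.pyGetD V (n : Int) 0 then
          [(PySem.List.pyGetD H (n : Int) 0, PySem.List.pyGetD S (n : Int) 0,
            PySem.List.pyGetD V (n : Int) 0)] else []) := by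
      unfold pvTrips
      rw [show List.range' 0 (n + 1) = List.range' 0 n ++ [n] by
        simpa using List.range'_concat (s := 0) (n := n) (step := 1)]
      rw [List.filterMap_append]
      split_ifs with hc
      · have hc' := hc; simp at hc'; simp [hc']
      · have hc' := hc; simp at hc'; simp [hc']
    rw [hcast, hrng, List.foldl_append, ih, htr]
    simp only [List.foldl_cons, List.foldl_nil, List.filter_append]
    by_cases h1 : PySem.List.pyGetD V (n : Int) 0 > 30
    · rw [if_pos h1]
      by_cases h2 : PySem.List.pyGetD V (n : Int) 0 < 100
      · have h2' := h2; simp at h2'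
        rw [if_pos h2, if_pos h1]
        simp [h2']
      · have h2' := h2; simp at h2'
        rw [if_neg h2, if_pos h1]
        simp [h2']
    · rw [if_neg h1, if_neg h1]
      simp

-- ===== VERDICT (by name: the statement is the Claim_ definition above) =====
theorem dark_eyed_color_spec : Claim_equal_dark_eyed_color := by
  intro H_list S_list V_list _ _
  unfold Spec_dark_eyed_color
  have hA := pvFoldA_gen H_list S_list V_list V_list 0 [] [] [] (by simp)
  simp only [Nat.cast_zero, Nat.sub_zero, List.nil_append] at hA
  have hA2 := pvFoldA2_gen (pvTrips H_list S_list V_list 0 V_list.length)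
      (pvTrips H_list S_list V_list 0 V_list.length) [] [] [] [] (by simp)
  simp only [List.length_nil, Nat.cast_zero, List.nil_append] at hA2
  have hB := pvFoldB H_list S_list V_list V_list.length
  simp only [dark_eyed_color, dark_eyed_color_alt]
  rw [hB, hA]
  simp only [hA2]
  by_cases hcond : 5 * ((pvTrips H_list S_list V_list 0 V_list.length).length : Int) ≥
      2 * (H_list.length : Int)
  · rw [if_pos (by simpa using hcond), if_pos hcond]
  · rw [if_neg (by simpa using hcond), if_neg hcond]
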